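-- pv_equiv track=rewrite | github.com/Rodrigo30329/USTA-Code | Aritmetica/CodificacionAritmetica.py | OrdenarFrecuenciasAparicion
-- ===== SOURCE A (Python) =====
-- def OrdenarFrecuenciasAparicion(diccionario):
--     frecuencias=list(diccionario)
--     OrdenAparicion={}
--     for posicion in range(len(frecuencias)):
--         repeticiones=0
--         for caracter in range(len(frecuencias)):
--             if frecuencias[posicion] == frecuencias[caracter]:
--                 repeticiones=repeticiones+1
--             else:
--                 repeticiones=repeticiones
--         OrdenAparicion[frecuencias[posicion]]=repeticiones
--     return OrdenAparicion
-- ===== SOURCE B (Python) =====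
-- def OrdenarFrecuenciasAparicion(diccionario):
--     res = {}
--     for c in diccionario:
--         res[c] = res.get(c, 0) + 1
--     return res
-- ===== Notes on version B (the rewrite author's own statement) =====
-- stated objective: faster
-- what changed: Replaced the nested O(n^2) re-count of each element against the whole key list by a single pass that maintains a dict of running counts (res[c] = res.get(c, 0) + 1).
import Mathlib
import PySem

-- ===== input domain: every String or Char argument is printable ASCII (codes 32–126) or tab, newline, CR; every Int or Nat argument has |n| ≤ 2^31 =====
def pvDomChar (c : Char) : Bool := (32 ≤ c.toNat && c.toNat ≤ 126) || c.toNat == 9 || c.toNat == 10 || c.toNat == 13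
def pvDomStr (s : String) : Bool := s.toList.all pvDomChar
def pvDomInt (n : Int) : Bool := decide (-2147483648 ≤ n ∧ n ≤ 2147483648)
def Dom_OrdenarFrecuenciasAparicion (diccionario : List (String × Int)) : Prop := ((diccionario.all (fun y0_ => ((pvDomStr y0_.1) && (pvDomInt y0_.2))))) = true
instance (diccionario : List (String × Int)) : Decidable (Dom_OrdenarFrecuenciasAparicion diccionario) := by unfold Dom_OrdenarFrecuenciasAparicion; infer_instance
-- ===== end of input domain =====

-- B replaces A's nested quadratic re-count of each key with a single counting pass over the keys (faster).

-- ===== PORT A =====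
-- frecuencias = list(diccionario): list() of a dict iterates its keys.
def OrdenarFrecuenciasAparicion (diccionario : List (String × Int)) : List (String × Int) :=
  let frecuencias := (PySem.Dict.ofList diccionario).keys
  let ordenAparicion :=
    (PySem.List.pyRange 0 (PySem.List.len frecuencias) 1).foldl
      (fun d posicion =>
        let repeticiones :=
          (PySem.List.pyRange 0 (PySem.List.len frecuencias) 1).foldl
            (fun r caracter =>
              if PySem.List.pyGetD frecuencias posicion "" == PySem.List.pyGetD frecuencias caracter ""
              then r + 1 else r)
            (0 : Int)
        d.insert (PySem.List.pyGetD frecuencias posicion "") repeticiones)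
      (PySem.Dict.empty)
  ordenAparicion.items

-- ===== PORT B =====
def OrdenarFrecuenciasAparicion_alt (diccionario : List (String × Int)) : List (String × Int) :=
  ((PySem.Dict.ofList diccionario).keys.foldl
      (fun res c => res.insert c (res.getD c 0 + 1))
      (PySem.Dict.empty : PySem.Dict String Int)).items

-- ===== PRECONDITION & SPEC =====
def Spec_OrdenarFrecuenciasAparicion (diccionario : List (String × Int)) (out : List (String × Int)) : Prop := out = OrdenarFrecuenciasAparicion_alt diccionario
instance (diccionario : List (String × Int)) (out : List (String × Int)) : Decidable (Spec_OrdenarFrecuenciasAparicion diccionario out) := by unfold Spec_OrdenarFrecuenciasAparicion; infer_instance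

-- ===== CLAIM (what is proved, stated in full; the proofs are below) =====
def Claim_equal_OrdenarFrecuenciasAparicion : Prop := ∀ (diccionario : List (String × Int)), Dom_OrdenarFrecuenciasAparicion diccionario → Spec_OrdenarFrecuenciasAparicion diccionario (OrdenarFrecuenciasAparicion diccionario)

-- ===== LEMMAS AND PROOFS =====

-- Both sides, applied to a duplicate-free key list ks, produce ks.map (fun k => (k, 1)).
theorem count_loop_eq_one (ks : List String) (hnd : ks.Nodup) (k : String) (hk : k ∈ ks) :
    (PySem.List.pyRange 0 (PySem.List.len ks) 1).foldl
      (fun r caracter => if k == PySem.List.pyGetD ks caracter "" then r + 1 else r)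
      (0 : Int) = 1 := by
  have hin := PySem.List.foldl_pyRange_zero_pyGetD ks ""
    (fun (r : Int) (y : String) => if k == y then r + 1 else r) (0 : Int)
  refine hin.trans ?_
  have hc : ∀ y ∈ ks, ∀ (r : Int),
      (fun (r : Int) (y : String) => if k == y then r + 1 else r) r y
      = (fun (r : Int) (y : String) => if y == k then r + 1 else r) r y := by
    intro y _ r
    simp only [beq_iff_eq]
    rcases eq_or_ne k y with h | h
    · subst h; rfl
    · rw [if_neg h, if_neg (Ne.symm h)]
  rw [PySem.List.foldl_congr_mem' ks
        (fun (r : Int) (y : String) => if k == y then r + 1 else r)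
        (fun (r : Int) (y : String) => if y == k then r + 1 else r)
        (0 : Int) hc]
  rw [PySem.List.foldl_beq_add_one, List.count_eq_one_of_mem hnd hk]
  norm_num

theorem portA_eq_map_one (ks : List String) (hnd : ks.Nodup) :
    ((PySem.List.pyRange 0 (PySem.List.len ks) 1).foldl
      (fun (d : PySem.Dict String Int) posicion =>
        d.insert (PySem.List.pyGetD ks posicion "")
          ((PySem.List.pyRange 0 (PySem.List.len ks) 1).foldl
            (fun r caracter =>
              if PySem.List.pyGetD ks posicion "" == PySem.List.pyGetD ks caracter ""
              then r + 1 else r)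
            (0 : Int)))
      PySem.Dict.empty).items
    = ks.map (fun k => (k, (1 : Int))) := by
  have houter := PySem.List.foldl_pyRange_zero_pyGetD ks ""
    (fun (d : PySem.Dict String Int) (k : String) =>
      d.insert k ((PySem.List.pyRange 0 (PySem.List.len ks) 1).foldl
        (fun r caracter => if k == PySem.List.pyGetD ks caracter "" then r + 1 else r)
        (0 : Int)))
    PySem.Dict.empty
  refine Eq.trans (congrArg PySem.Dict.items houter) ?_
  have hcong : ∀ k ∈ ks, ∀ (d : PySem.Dict String Int),
      (fun (d : PySem.Dict String Int) (k : String) =>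
        d.insert k ((PySem.List.pyRange 0 (PySem.List.len ks) 1).foldl
          (fun r caracter => if k == PySem.List.pyGetD ks caracter "" then r + 1 else r)
          (0 : Int))) d k
      = (fun (d : PySem.Dict String Int) (k : String) => d.insert k 1) d k := by
    intro k hk d
    simp only
    rw [count_loop_eq_one ks hnd k hk]
  rw [PySem.List.foldl_congr_mem' ks _ _ PySem.Dict.empty hcong]
  refine Eq.trans (PySem.Dict.items_foldl_insert_fresh ks (fun x => x) (fun _ => (1 : Int))
        PySem.Dict.empty
        (by intro a _; exact PySem.Dict.contains_empty a) (by simpa using hnd)) ?_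
  simp [PySem.Dict.empty]

theorem portB_eq_map_one (ks : List String) (hnd : ks.Nodup) :
    ((ks.foldl (fun (res : PySem.Dict String Int) c => res.insert c (res.getD c 0 + 1))
        PySem.Dict.empty).items)
    = ks.map (fun k => (k, (1 : Int))) := by
  rw [PySem.Dict.foldl_insert_getD_add_one_eq_counter]
  rw [PySem.Dict.items_counter]
  rw [PySem.Set.ofList_eq_self_of_nodup _ hnd]
  exact List.map_congr_left (fun k hk => by rw [List.count_eq_one_of_mem hnd hk]; norm_num)

-- ===== VERDICT (by name: the statement is the Claim_ definition above) =====
theorem OrdenarFrecuenciasAparicion_spec : Claim_equal_OrdenarFrecuenciasAparicion := by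
  intro d _
  unfold Spec_OrdenarFrecuenciasAparicion OrdenarFrecuenciasAparicion OrdenarFrecuenciasAparicion_alt
  have hnd : (PySem.Dict.ofList d).keys.Nodup := PySem.Dict.nodup_keys_ofList d
  simp only []
  rw [portA_eq_map_one _ hnd, portB_eq_map_one _ hnd]
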